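-- pv_equiv track=rewrite | github.com/cmu-hgc-mac/HGC_DB_postgres | export_data/dbloader_scp_xml.py | get_proto_module_files
-- ===== SOURCE A (Python) =====
-- def get_proto_module_files(files_list):
--     protomodule_files, module_files, other_files = [],[],[]
--     for fname in files_list:
--         if 'protomodule' in fname.lower():
--             protomodule_files.append(fname)
--         elif 'module' in fname.lower():
--             module_files.append(fname)
--         else:
--             other_files.append(fname)
--     return protomodule_files, module_files, other_files
-- ===== SOURCE B (Python) =====
-- def get_proto_module_files(files_list):
--     protomodule_files = [f for f in files_list if 'protomodule' in f.lower()]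
--     module_files = [f for f in files_list
--                     if 'module' in f.lower() and 'protomodule' not in f.lower()]
--     other_files = [f for f in files_list if 'module' not in f.lower()]
--     return protomodule_files, module_files, other_files
-- ===== Notes on version B (the rewrite author's own statement) =====
-- stated objective: idiomatic
-- what changed: Replaces the single loop with three-way branch dispatch by three independent filtering list comprehensions, one per bucket.
import Mathlib
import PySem

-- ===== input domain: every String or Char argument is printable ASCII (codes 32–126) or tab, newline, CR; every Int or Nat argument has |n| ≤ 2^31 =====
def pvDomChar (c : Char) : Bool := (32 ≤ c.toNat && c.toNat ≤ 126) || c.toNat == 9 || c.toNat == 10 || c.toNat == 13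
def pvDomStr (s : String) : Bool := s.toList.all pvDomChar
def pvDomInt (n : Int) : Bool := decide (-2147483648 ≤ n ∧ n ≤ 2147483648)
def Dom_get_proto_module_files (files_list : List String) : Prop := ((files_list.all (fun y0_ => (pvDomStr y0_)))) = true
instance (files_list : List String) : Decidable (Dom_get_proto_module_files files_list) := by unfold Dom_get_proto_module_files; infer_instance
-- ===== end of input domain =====

-- B replaces A's single loop with three-way branching by three independent filtering passes (more idiomatic; same O(n) cost).


-- ===== PORT A =====
def get_proto_module_files (files_list : List String) : List String × List String × List String :=
  let r := files_list.foldl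
    (fun (acc : List String × List String × List String) fname =>
      if PySem.Str.isIn "protomodule" (PySem.Str.lower fname) then
        (acc.1 ++ [fname], acc.2.1, acc.2.2)
      else if PySem.Str.isIn "module" (PySem.Str.lower fname) then
        (acc.1, acc.2.1 ++ [fname], acc.2.2)
      else
        (acc.1, acc.2.1, acc.2.2 ++ [fname]))
    ([], [], [])
  (r.1, r.2.1, r.2.2)

-- ===== PORT B =====
def get_proto_module_files_alt (files_list : List String) : List String × List String × List String :=
  let protomodule_files := files_list.filter (fun f => PySem.Str.isIn "protomodule" (PySem.Str.lower f))
  let module_files := files_list.filter (fun f =>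
    PySem.Str.isIn "module" (PySem.Str.lower f) && !PySem.Str.isIn "protomodule" (PySem.Str.lower f))
  let other_files := files_list.filter (fun f => !PySem.Str.isIn "module" (PySem.Str.lower f))
  (protomodule_files, module_files, other_files)

-- ===== PRECONDITION & SPEC =====
def Spec_get_proto_module_files (files_list : List String) (out : List String × List String × List String) : Prop := out = get_proto_module_files_alt files_list
instance (files_list : List String) (out : List String × List String × List String) : Decidable (Spec_get_proto_module_files files_list out) := by unfold Spec_get_proto_module_files; infer_instance

-- ===== CLAIM (what is proved, stated in full; the proofs are below) =====
def Claim_equal_get_proto_module_files : Prop := ∀ (files_list : List String), Dom_get_proto_module_files files_list → Spec_get_proto_module_files files_list (get_proto_module_files files_list)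

-- ===== LEMMAS AND PROOFS =====
lemma gpmf_foldl_inv (p q : String → Bool) (xs a b c : List String) :
    xs.foldl
      (fun (acc : List String × List String × List String) fname =>
        if p fname then (acc.1 ++ [fname], acc.2.1, acc.2.2)
        else if q fname then (acc.1, acc.2.1 ++ [fname], acc.2.2)
        else (acc.1, acc.2.1, acc.2.2 ++ [fname]))
      (a, b, c)
    = (a ++ xs.filter p,
       b ++ xs.filter (fun f => q f && !p f),
       c ++ xs.filter (fun f => !p f && !q f)) := by
  induction xs generalizing a b c with
  | nil => simp
  | cons x xs ih =>
    by_cases hp : p x = true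
    · simp [List.foldl_cons, hp, ih]
    · by_cases hm : q x = true
      · simp [List.foldl_cons, hp, hm, ih]
      · simp [List.foldl_cons, hp, hm, ih]

lemma gpmf_proto_imp_module (s : String) :
    PySem.Str.isIn "protomodule" (PySem.Str.lower s) = true →
    PySem.Str.isIn "module" (PySem.Str.lower s) = true := by
  intro h
  rw [PySem.Str.isIn_iff_infix] at h ⊢
  exact List.IsInfix.trans (by decide : "module".toList <:+: "protomodule".toList) h

lemma gpmf_other (f : String) :
    (!PySem.Str.isIn "protomodule" (PySem.Str.lower f) && !PySem.Str.isIn "module" (PySem.Str.lower f))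
    = !PySem.Str.isIn "module" (PySem.Str.lower f) := by
  cases h : PySem.Str.isIn "module" (PySem.Str.lower f) with
  | true => rw [Bool.not_true, Bool.and_false]
  | false =>
    have hp : PySem.Str.isIn "protomodule" (PySem.Str.lower f) = false := by
      cases hp' : PySem.Str.isIn "protomodule" (PySem.Str.lower f) with
      | true => rw [gpmf_proto_imp_module f hp'] at h; exact h
      | false => rfl
    rw [hp, Bool.not_false]; rfl

-- ===== VERDICT (by name: the statement is the Claim_ definition above) =====
theorem get_proto_module_files_spec : Claim_equal_get_proto_module_files := by
  intro files_list _
  show _ = _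
  unfold get_proto_module_files get_proto_module_files_alt
  rw [gpmf_foldl_inv]
  simp only [List.nil_append]
  congr 1
  congr 1
  exact List.filter_congr (fun f _ => gpmf_other f)
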